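-- pv_equiv track=rewrite | github.com/Utsav-Lal/Class-Projects | ADSA (2023-2024)/block_1_submissions/assignment_1.py | funny_histogram
-- ===== SOURCE A (Python) =====
-- def simple_histogram(sentence):
--     histogram = {}
--     for i in sentence:
--         if i.islower():
--             if i in histogram:
--                 histogram[i] += 1
--             else:
--                 histogram[i] = 1
--     return histogram
--
-- def mergedict(dict1, dict2):
--     tempdict1 = dict1.copy()
--     tempdict2 = dict2.copy()
--     for i in tempdict1:
--         if i in tempdict2:
--             tempdict2[i] += tempdict1[i]
--     tempdict1.update(tempdict2)
--     return tempdict1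
--
-- def funny_histogram(sentence):
--     wordlist = sentence.split(" ")
--     emptydict = {}
--     fulldict = {}
--     for word in wordlist:
--         for letter in word:
--             emptydict[letter] = 0
--             fulldict[letter] = {}
--     for word in wordlist:
--         tempdict = mergedict(emptydict, simple_histogram(word))
--         templist = []
--         for letter in word:
--             if letter not in templist:
--                 fulldict[letter] = mergedict(fulldict[letter], tempdict)
--                 templist.append(letter)
--     return fulldict
-- ===== SOURCE B (Python) =====
-- def funny_histogram(sentence):
--     words = sentence.split(" ")
--     letters = list(dict.fromkeys(c for w in words for c in w))
--     def cell(c, d):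
--         return sum(sum(1 for ch in w if ch.islower() and ch == d)
--                    for w in words if c in w)
--     return {c: {d: cell(c, d) for d in letters} for c in letters}
-- ===== Notes on version B (the rewrite author's own statement) =====
-- stated objective: simpler
-- what changed: B replaces A's staged dict machinery (zero-template dict, per-word mergedict accumulation into per-letter rows with a seen-list) by a direct closed form: each table cell (c,d) is computed independently as the sum over words containing c of the lowercase occurrences of d, built in one nested comprehension.
import Mathlib
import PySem

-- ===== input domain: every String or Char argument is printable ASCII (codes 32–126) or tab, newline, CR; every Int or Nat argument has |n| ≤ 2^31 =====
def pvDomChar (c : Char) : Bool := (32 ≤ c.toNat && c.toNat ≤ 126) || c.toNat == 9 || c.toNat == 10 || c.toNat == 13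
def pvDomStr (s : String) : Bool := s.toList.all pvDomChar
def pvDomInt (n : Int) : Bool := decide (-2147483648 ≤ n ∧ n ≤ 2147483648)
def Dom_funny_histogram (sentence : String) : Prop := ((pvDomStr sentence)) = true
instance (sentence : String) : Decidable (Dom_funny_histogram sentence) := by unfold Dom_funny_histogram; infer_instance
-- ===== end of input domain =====

-- B drops A's dict-merging accumulation entirely and computes every table cell by a direct
-- closed-form sum over the words (objective: simpler, not faster).

-- ===== PORT A =====
def simple_histogram (sentence : String) : PySem.Dict String Int :=
  sentence.toList.foldl (fun histogram i =>
    if PySem.Chars.islower i then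
      if histogram.contains (String.ofList [i]) then
        histogram.insert (String.ofList [i]) (histogram.getD (String.ofList [i]) 0 + 1)
      else
        histogram.insert (String.ofList [i]) 1
    else histogram) PySem.Dict.empty

def mergedict (dict1 dict2 : PySem.Dict String Int) : PySem.Dict String Int :=
  let tempdict2 := dict1.keys.foldl (fun t i =>
    if t.contains i then t.insert i (t.getD i 0 + dict1.getD i 0) else t) dict2
  tempdict2.items.foldl (fun t p => t.insert p.1 p.2) dict1

-- sentence.split(" "): the separator is non-empty, so Python never raises; split? is some here.
def funny_histogram (sentence : String) : List (String × List (String × Int)) :=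
  let wordlist := (PySem.Str.split? sentence " ").getD []
  let init := wordlist.foldl
    (fun (p : PySem.Dict String Int × PySem.Dict String (PySem.Dict String Int)) word =>
      word.toList.foldl (fun p letter =>
        (p.1.insert (String.ofList [letter]) 0, p.2.insert (String.ofList [letter]) PySem.Dict.empty)) p)
    (PySem.Dict.empty, PySem.Dict.empty)
  let fulldict := wordlist.foldl (fun fulldict word =>
      let tempdict := mergedict init.1 (simple_histogram word)
      (word.toList.foldl
        (fun (q : PySem.Dict String (PySem.Dict String Int) × List String) letter =>
          if String.ofList [letter] ∈ q.2 then q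
          else (q.1.insert (String.ofList [letter])
                  (mergedict (q.1.getD (String.ofList [letter]) PySem.Dict.empty) tempdict),
                q.2 ++ [String.ofList [letter]]))
        (fulldict, ([] : List String))).1)
    init.2
  fulldict.items.map (fun p => (p.1, p.2.items))

-- ===== PORT B =====
-- cell(c, d): sum over the words containing c of how many lowercase characters of the word equal d
-- ('ch == d' compares the 1-char string of ch with d, as in Source B).
def fh_cell (words : List String) (c d : String) : Int :=
  ((words.filter (fun w => PySem.Str.isIn c w)).map
    (fun w => ((w.toList.filter (fun ch => PySem.Chars.islower ch && (String.ofList [ch] == d))).length : Int))).sum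

def funny_histogram_alt (sentence : String) : List (String × List (String × Int)) :=
  let words := (PySem.Str.split? sentence " ").getD []
  let letters := PySem.List.dedup (words.flatMap (fun w => w.toList.map (fun c => String.ofList [c])))
  letters.map (fun c => (c, letters.map (fun d => (d, fh_cell words c d))))

-- ===== PRECONDITION & SPEC =====
def Spec_funny_histogram (sentence : String) (out : List (String × List (String × Int))) : Prop := out = funny_histogram_alt sentence
instance (sentence : String) (out : List (String × List (String × Int))) : Decidable (Spec_funny_histogram sentence out) := by unfold Spec_funny_histogram; infer_instance

-- ===== CLAIM (what is proved, stated in full; the proofs are below) =====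
def Claim_equal_funny_histogram : Prop := ∀ (sentence : String), Dom_funny_histogram sentence → Spec_funny_histogram sentence (funny_histogram sentence)

-- ===== LEMMAS AND PROOFS =====

-- the letters of a word, as 1-char strings
def pvStrs (w : String) : List String := w.toList.map (fun c => String.ofList [c])
-- the lowercase letters of a word, as 1-char strings
def pvLch (w : String) : List String := (w.toList.filter PySem.Chars.islower).map (fun c => String.ofList [c])
-- how often the lowercase letter d occurs in w
def pvCnt (w d : String) : Int := ((pvLch w).count d : Int)
-- the value both programs compute: summed histograms of the words of ws containing c
def pvG (ws : List String) (c d : String) : Int :=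
  (ws.map (fun w => if c ∈ pvStrs w then pvCnt w d else 0)).sum

theorem pvG_cons (w : String) (ws : List String) (c d : String) :
    pvG (w :: ws) c d = (if c ∈ pvStrs w then pvCnt w d else 0) + pvG ws c d := by
  simp [pvG]

theorem pv_upd_get? (ps : List (String × Int)) (hnd : (ps.map Prod.fst).Nodup)
    (D : PySem.Dict String Int) (k : String) :
    (ps.foldl (fun t p => t.insert p.1 p.2) D).get? k =
      ((PySem.Dict.mk ps).get? k).or (D.get? k) := by
  induction ps generalizing D with
  | nil => simp [PySem.Dict.get?]
  | cons p rest ih =>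
    obtain ⟨a, v⟩ := p
    simp only [List.map_cons, List.nodup_cons] at hnd
    rw [List.foldl_cons, ih hnd.2, PySem.Dict.get?_mk_cons]
    by_cases hk : a = k
    · subst hk
      have : (PySem.Dict.mk rest).get? a = none := by
        rw [PySem.Dict.get?_eq_none_iff_not_mem_keys]
        simpa using hnd.1
      simp [this, PySem.Dict.get?_insert_self]
    · simp only [beq_iff_eq, hk, if_false]
      rw [PySem.Dict.get?_insert]
      simp [Ne.symm hk]

theorem pv_set_update_eq (xs : List String) : ∀ (s : PySem.Set String), xs.Nodup →
    PySem.Set.update s xs = s ++ xs.filter (fun x => !s.contains x) := by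
  induction xs with
  | nil => intro s _; simp [PySem.Set.update]
  | cons x rest ih =>
    intro s hnd
    simp only [List.nodup_cons] at hnd
    show PySem.Set.update (PySem.Set.add s x) rest = _
    by_cases hc : s.contains x = true
    · rw [show PySem.Set.add s x = s by rw [PySem.Set.add, if_pos hc]]
      rw [ih s hnd.2]
      have hm : x ∈ s := List.mem_of_elem_eq_true hc
      simp [List.filter_cons, hm]
    · rw [show PySem.Set.add s x = s ++ [x] by rw [PySem.Set.add, if_neg hc]]
      rw [ih (s ++ [x]) hnd.2]
      have hf : rest.filter (fun y => !(s ++ [x]).contains y) = rest.filter (fun y => !s.contains y) := by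
        apply List.filter_congr
        intro y hy
        have hyx : y ≠ x := fun h => hnd.1 (h ▸ hy)
        have : (s ++ [x]).contains y = s.contains y := by
          simp [List.contains_append, List.elem_cons, hyx]
        rw [this]
      rw [hf]
      have hm : x ∉ s := fun h => hc (List.elem_eq_true_of_mem h)
      simp [List.filter_cons, hm]

theorem pv_t2_spec (E : PySem.Dict String Int) (l : List String) (hl : l.Nodup) :
    ∀ (t : PySem.Dict String Int),
    (l.foldl (fun t i => if t.contains i then t.insert i (t.getD i 0 + E.getD i 0) else t) t).keys = t.keys ∧
    ∀ k, (l.foldl (fun t i => if t.contains i then t.insert i (t.getD i 0 + E.getD i 0) else t) t).getD k 0 =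
      t.getD k 0 + (if k ∈ l ∧ t.contains k then E.getD k 0 else 0) := by
  induction l with
  | nil => intro t; simp
  | cons i rest ih =>
    intro t
    simp only [List.nodup_cons] at hl
    obtain ⟨hi, hrest⟩ := hl
    rw [List.foldl_cons]
    by_cases hc : t.contains i = true
    · set t' := t.insert i (t.getD i 0 + E.getD i 0) with ht'
      have hk' : t'.keys = t.keys := PySem.Dict.keys_insert_of_contains t _ hc
      have hcont : ∀ k, t'.contains k = t.contains k := by
        intro k
        rw [PySem.Dict.contains_eq_decide_mem_keys, PySem.Dict.contains_eq_decide_mem_keys, hk']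
      rw [if_pos hc]
      obtain ⟨ihk, ihv⟩ := ih hrest t'
      constructor
      · rw [ihk, hk']
      · intro k
        rw [ihv k, hcont k, PySem.Dict.getD_insert]
        by_cases hki : k = i
        · subst hki
          have : k ∉ rest := hi
          simp [this, hc]
        · simp [hki]
    · rw [if_neg hc]
      obtain ⟨ihk, ihv⟩ := ih hrest t
      refine ⟨ihk, fun k => ?_⟩
      rw [ihv k]
      by_cases hki : k = i
      · subst hki; simp [hc]
      · simp [hki]

theorem pv_mergedict_spec (D T : PySem.Dict String Int)
    (hD : D.keys.Nodup) (hT : T.keys.Nodup) :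
    (mergedict D T).keys = D.keys ++ T.keys.filter (fun k => !D.contains k) ∧
    ∀ k, (mergedict D T).getD k 0 = D.getD k 0 + T.getD k 0 := by
  obtain ⟨ht2k, ht2v⟩ := pv_t2_spec D D.keys hD T
  set t2 := D.keys.foldl (fun t i => if t.contains i then t.insert i (t.getD i 0 + D.getD i 0) else t) T with ht2
  have ht2nd : t2.keys.Nodup := ht2k ▸ hT
  have hitems : t2.items.map Prod.fst = t2.keys := rfl
  have heta : PySem.Dict.mk t2.items = t2 := rfl
  constructor
  · show (t2.items.foldl (fun t p => t.insert p.1 p.2) D).keys = _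
    rw [PySem.Dict.keys_foldl_insert_key t2.items Prod.fst (fun _ p => p.2) D]
    rw [hitems, ht2k, pv_set_update_eq T.keys D.keys hT]
    congr 1
    apply List.filter_congr
    intro y _
    rw [PySem.Dict.contains_eq_decide_mem_keys]
    simp
  · intro k
    show (t2.items.foldl (fun t p => t.insert p.1 p.2) D).getD k 0 = _
    rw [PySem.Dict.getD_eq_get?_getD, pv_upd_get? t2.items ht2nd D k, heta]
    by_cases hk : k ∈ T.keys
    · have hc : t2.contains k = true := by
        rw [PySem.Dict.contains_iff_mem_keys, ht2k]; exact hk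
      have hsome : (t2.get? k).isSome := by rw [← PySem.Dict.contains_eq_isSome_get?, hc]
      obtain ⟨v, hv⟩ := Option.isSome_iff_exists.mp hsome
      have hvv : t2.getD k 0 = v := by rw [PySem.Dict.getD_eq_get?_getD, hv]; rfl
      have hTc : T.contains k = true := (PySem.Dict.contains_iff_mem_keys T k).mpr hk
      rw [hv]
      simp only [Option.some_or, Option.getD_some]
      rw [← hvv, ht2v k]
      by_cases hkD : k ∈ D.keys
      · rw [if_pos ⟨hkD, hTc⟩]; ring
      · rw [if_neg (by tauto)]
        have : D.getD k 0 = 0 := PySem.Dict.getD_of_not_contains D 0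
          (by rw [← Bool.not_eq_true, PySem.Dict.contains_iff_mem_keys]; exact hkD)
        rw [this]; ring
    · have hnone : t2.get? k = none := by
        rw [PySem.Dict.get?_eq_none_iff_not_mem_keys, ht2k]; exact hk
      rw [hnone]
      simp only [Option.none_or]
      rw [← PySem.Dict.getD_eq_get?_getD]
      have : T.getD k 0 = 0 := PySem.Dict.getD_of_not_contains T 0
        (by rw [← Bool.not_eq_true, PySem.Dict.contains_iff_mem_keys]; exact hk)
      rw [this]; ring

theorem pv_foldl_insert_getD_const {β ν : Type} (l : List β) (key : β → String) (v0 : ν) :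
    ∀ (d : PySem.Dict String ν), (∀ k, d.getD k v0 = v0) → ∀ (k : String),
    (l.foldl (fun d x => d.insert (key x) v0) d).getD k v0 = v0 := by
  induction l with
  | nil => intro d h k; exact h k
  | cons x rest ih =>
    intro d h k
    rw [List.foldl_cons]
    exact ih _ (fun k' => by rw [PySem.Dict.getD_insert]; split <;> simp [h]) k

theorem pv_foldl_foldl_flatMap {σ : Type} (f : σ → Char → σ) (ws : List String) (init : σ) :
    ws.foldl (fun s w => w.toList.foldl f s) init = (ws.flatMap String.toList).foldl f init := by
  induction ws generalizing init with
  | nil => rfl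
  | cons w rest ih => rw [List.foldl_cons, ih, List.flatMap_cons, List.foldl_append]

theorem pv_simple_histogram_eq (w : String) :
    simple_histogram w = PySem.Dict.counter (pvLch w) := by
  unfold simple_histogram pvLch
  have h1 := PySem.List.foldl_congr_mem
    (l := w.toList) (init := (PySem.Dict.empty : PySem.Dict String Int))
    (f := fun histogram i =>
      if PySem.Chars.islower i then
        if histogram.contains (String.ofList [i]) then
          histogram.insert (String.ofList [i]) (histogram.getD (String.ofList [i]) 0 + 1)
        else histogram.insert (String.ofList [i]) 1
      else histogram)
    (g := fun h i =>
      if PySem.Chars.islower i then h.insert (String.ofList [i]) (h.getD (String.ofList [i]) 0 + 1) else h)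
    (by
      intro acc x _
      dsimp only
      by_cases hl : PySem.Chars.islower x
      · rw [if_pos hl, if_pos hl]
        by_cases hc : acc.contains (String.ofList [x]) = true
        · rw [if_pos hc]
        · rw [if_neg hc, PySem.Dict.getD_of_not_contains acc 0 (Bool.not_eq_true _ ▸ hc)]
          norm_num
      · rw [if_neg hl, if_neg hl])
  rw [h1]
  rw [PySem.List.foldl_if_eq_foldl_filter]
  rw [show (List.foldl (fun (h : PySem.Dict String Int) i => h.insert (String.ofList [i]) (h.getD (String.ofList [i]) 0 + 1)) PySem.Dict.empty (w.toList.filter PySem.Chars.islower)) = (List.foldl (fun (h : PySem.Dict String Int) s => h.insert s (h.getD s 0 + 1)) PySem.Dict.empty ((w.toList.filter PySem.Chars.islower).map (fun c => String.ofList [c]))) from (List.foldl_map (f := fun c => String.ofList [c]) (g := fun (h : PySem.Dict String Int) s => h.insert s (h.getD s 0 + 1)) (l := w.toList.filter PySem.Chars.islower) (init := PySem.Dict.empty)).symm]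
  rw [PySem.Dict.foldl_insert_getD_add_one_eq_counter]

-- merged row: both shapes that occur in A
theorem pv_merge_row (L : List String) (hL : L.Nodup) (T : PySem.Dict String Int)
    (hTk : T.keys = L) (D : PySem.Dict String Int)
    (hD : D = PySem.Dict.empty ∨ D.keys = L) :
    (mergedict D T).keys = L ∧ ∀ k, (mergedict D T).getD k 0 = D.getD k 0 + T.getD k 0 := by
  have hTnd : T.keys.Nodup := hTk ▸ hL
  rcases hD with h | h
  · subst h
    obtain ⟨hk, hv⟩ := pv_mergedict_spec PySem.Dict.empty T (by simp) hTnd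
    refine ⟨?_, hv⟩
    rw [hk, hTk]
    have hfil : L.filter (fun k => !(PySem.Dict.empty : PySem.Dict String Int).contains k) = L :=
      List.filter_eq_self.mpr (fun k _ => by rw [PySem.Dict.contains_empty]; rfl)
    rw [hfil]
    rfl
  · obtain ⟨hk, hv⟩ := pv_mergedict_spec D T (h ▸ hL) hTnd
    refine ⟨?_, hv⟩
    rw [hk, hTk]
    have : L.filter (fun k => !D.contains k) = [] := by
      rw [List.filter_eq_nil_iff]
      intro k hkL
      have : D.contains k = true := (PySem.Dict.contains_iff_mem_keys D k).mpr (h ▸ hkL)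
      simp [this]
    rw [this, List.append_nil, h]

def pvAstepW (T : PySem.Dict String Int)
    (q : PySem.Dict String (PySem.Dict String Int) × List String) (letter : Char) :
    PySem.Dict String (PySem.Dict String Int) × List String :=
  if String.ofList [letter] ∈ q.2 then q
  else (q.1.insert (String.ofList [letter])
          (mergedict (q.1.getD (String.ofList [letter]) PySem.Dict.empty) T),
        q.2 ++ [String.ofList [letter]])

-- invariant through A's per-word letter loop
theorem pv_A_word (L : List String) (hL : L.Nodup) (T : PySem.Dict String Int)
    (hTk : T.keys = L) (l : List Char) (hlsub : ∀ c ∈ l, String.ofList [c] ∈ L) :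
    ∀ (fd : PySem.Dict String (PySem.Dict String Int)) (tl : List String),
    fd.keys = L →
    (∀ c ∈ L, fd.getD c PySem.Dict.empty = PySem.Dict.empty ∨ (fd.getD c PySem.Dict.empty).keys = L) →
    (∀ c ∈ L, c ∈ tl → (fd.getD c PySem.Dict.empty).keys = L) →
    ((l.foldl (pvAstepW T) (fd, tl)).1.keys = L ∧
     (∀ c ∈ L, ((l.foldl (pvAstepW T) (fd, tl)).1.getD c PySem.Dict.empty = PySem.Dict.empty ∨
                ((l.foldl (pvAstepW T) (fd, tl)).1.getD c PySem.Dict.empty).keys = L)) ∧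
     (∀ c ∈ L, c ∈ tl ++ l.map (fun ch => String.ofList [ch]) →
        ((l.foldl (pvAstepW T) (fd, tl)).1.getD c PySem.Dict.empty).keys = L) ∧
     (∀ c ∈ L, (fd.getD c PySem.Dict.empty).keys = L →
        ((l.foldl (pvAstepW T) (fd, tl)).1.getD c PySem.Dict.empty).keys = L) ∧
     ∀ c ∈ L, ∀ d, ((l.foldl (pvAstepW T) (fd, tl)).1.getD c PySem.Dict.empty).getD d 0 =
       (fd.getD c PySem.Dict.empty).getD d 0 +
         (if c ∈ l.map (fun ch => String.ofList [ch]) ∧ c ∉ tl then T.getD d 0 else 0)) := by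
  induction l with
  | nil =>
    intro fd tl hk hrows htl
    exact ⟨hk, hrows, fun c hc hm => htl c hc (by simpa using hm), fun c _ h => h, fun c hc d => by simp⟩
  | cons ch rest ih =>
    intro fd tl hk hrows htl
    rw [List.foldl_cons]
    by_cases hmem : String.ofList [ch] ∈ tl
    · rw [show pvAstepW T (fd, tl) ch = (fd, tl) by rw [pvAstepW, if_pos hmem]]
      obtain ⟨ihk, ihrows, ihfull, ihpres, ihv⟩ := ih (fun c hc => hlsub c (by simp [hc])) fd tl hk hrows htl
      refine ⟨ihk, ihrows, fun c hc hm => ihfull c hc ?_, ihpres, fun c hc d => ?_⟩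
      · simp only [List.map_cons] at hm
        rcases List.mem_append.mp hm with h | h
        · exact List.mem_append.mpr (Or.inl h)
        · rcases List.mem_cons.mp h with h' | h'
          · exact List.mem_append.mpr (Or.inl (h' ▸ hmem))
          · exact List.mem_append.mpr (Or.inr h')
      · rw [ihv c hc d]
        congr 1
        by_cases hctl : c ∈ tl
        · rw [if_neg (by tauto), if_neg (by tauto)]
        · by_cases hcr : c ∈ rest.map (fun ch => String.ofList [ch])
          · rw [if_pos ⟨hcr, hctl⟩, if_pos ⟨by simp [hcr], hctl⟩]
          · have : c ∉ List.map (fun ch => String.ofList [ch]) (ch :: rest) := by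
              simp only [List.map_cons, List.mem_cons]
              rintro (h | h)
              · exact hctl (h ▸ hmem)
              · exact hcr h
            rw [if_neg (by tauto), if_neg (by tauto)]
    · have hsL : String.ofList [ch] ∈ L := hlsub ch (by simp)
      obtain ⟨hmk, hmv⟩ := pv_merge_row L hL T hTk (fd.getD (String.ofList [ch]) PySem.Dict.empty) (hrows _ hsL)
      rw [show pvAstepW T (fd, tl) ch =
        (fd.insert (String.ofList [ch]) (mergedict (fd.getD (String.ofList [ch]) PySem.Dict.empty) T),
         tl ++ [String.ofList [ch]]) by rw [pvAstepW, if_neg hmem]]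
      set s := String.ofList [ch] with hs
      set fd' := fd.insert s (mergedict (fd.getD s PySem.Dict.empty) T) with hfd'
      have hk' : fd'.keys = L := by
        rw [hfd', PySem.Dict.keys_insert_of_contains fd _ ((PySem.Dict.contains_iff_mem_keys fd s).mpr (hk ▸ hsL))]
        exact hk
      have hget' : ∀ c, fd'.getD c PySem.Dict.empty =
          if c = s then mergedict (fd.getD s PySem.Dict.empty) T else fd.getD c PySem.Dict.empty := by
        intro c; rw [hfd', PySem.Dict.getD_insert]
      have hrows' : ∀ c ∈ L, fd'.getD c PySem.Dict.empty = PySem.Dict.empty ∨ (fd'.getD c PySem.Dict.empty).keys = L := by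
        intro c hc; rw [hget' c]
        by_cases hcs : c = s
        · rw [if_pos hcs]; exact Or.inr hmk
        · rw [if_neg hcs]; exact hrows c hc
      have htl' : ∀ c ∈ L, c ∈ tl ++ [s] → (fd'.getD c PySem.Dict.empty).keys = L := by
        intro c hc hm; rw [hget' c]
        by_cases hcs : c = s
        · rw [if_pos hcs]; exact hmk
        · rw [if_neg hcs]; exact htl c hc (by rcases List.mem_append.mp hm with h | h; exact h; simp at h; exact absurd h hcs)
      obtain ⟨ihk, ihrows, ihfull, ihpres, ihv⟩ := ih (fun c hc => hlsub c (by simp [hc])) fd' (tl ++ [s]) hk' hrows' htl'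
      have hpres : ∀ c ∈ L, (fd.getD c PySem.Dict.empty).keys = L →
          ((rest.foldl (pvAstepW T) (fd', tl ++ [s])).1.getD c PySem.Dict.empty).keys = L := by
        intro c hc hful
        refine ihpres c hc ?_
        rw [hget' c]
        by_cases hcs : c = s
        · rw [if_pos hcs]; exact hmk
        · rw [if_neg hcs]; exact hful
      refine ⟨ihk, ihrows, fun c hc hm => ihfull c hc ?_, hpres, fun c hc d => ?_⟩
      · simp only [List.map_cons, List.mem_append, List.mem_cons] at hm ⊢
        tauto
      · rw [ihv c hc d, hget' c]
        by_cases hcs : c = s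
        · rw [if_pos hcs, hmv d]
          rw [if_neg (by rintro ⟨_, habs⟩; exact habs (by simp [hcs])),
              if_pos ⟨by simp [hcs, hs], hcs ▸ hmem⟩]
          rw [hcs]; ring
        · rw [if_neg hcs]
          congr 1
          by_cases hctl : c ∈ tl
          · rw [if_neg (by simp [hctl]), if_neg (by simp [hctl])]
          · by_cases hcr : c ∈ rest.map (fun ch' => String.ofList [ch'])
            · rw [if_pos ⟨hcr, by simp [hcs, hctl]⟩, if_pos ⟨by simp [hcr], hctl⟩]
            · have hnc : c ∉ List.map (fun ch' => String.ofList [ch']) (ch :: rest) := by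
                simp only [List.map_cons, List.mem_cons]
                rintro (h | h)
                · exact hcs h
                · exact hcr h
              rw [if_neg (by tauto), if_neg (by tauto)]

theorem pv_tempdict (L : List String) (hL : L.Nodup) (E : PySem.Dict String Int)
    (hEk : E.keys = L) (hEv : ∀ k, E.getD k 0 = 0) (w : String)
    (hw : ∀ s ∈ pvStrs w, s ∈ L) :
    (mergedict E (simple_histogram w)).keys = L ∧
    ∀ d, (mergedict E (simple_histogram w)).getD d 0 = pvCnt w d := by
  rw [pv_simple_histogram_eq w]
  have hCk := PySem.Dict.keys_counter (pvLch w)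
  have hsub : ∀ k ∈ (PySem.Dict.counter (pvLch w)).keys, k ∈ L := by
    intro k hk
    rw [hCk] at hk
    have : k ∈ pvLch w := (PySem.Set.mem_ofList _ _).mp hk
    obtain ⟨c, hc, rfl⟩ := List.mem_map.mp this
    exact hw _ (List.mem_map.mpr ⟨c, List.mem_of_mem_filter hc, rfl⟩)
  obtain ⟨hk, hv⟩ := pv_mergedict_spec E (PySem.Dict.counter (pvLch w)) (hEk ▸ hL)
    (PySem.Dict.nodup_keys_counter _)
  constructor
  · rw [hk, hEk]
    have : (PySem.Dict.counter (pvLch w)).keys.filter (fun k => !E.contains k) = [] := by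
      rw [List.filter_eq_nil_iff]
      intro k hkm
      have : E.contains k = true := (PySem.Dict.contains_iff_mem_keys E k).mpr (hEk ▸ hsub k hkm)
      simp [this]
    rw [this, List.append_nil]
  · intro d
    rw [hv d, hEv d, PySem.Dict.getD_counter]
    simp [pvCnt]

def pvAstep (E : PySem.Dict String Int) (fd : PySem.Dict String (PySem.Dict String Int))
    (word : String) : PySem.Dict String (PySem.Dict String Int) :=
  (word.toList.foldl (pvAstepW (mergedict E (simple_histogram word))) (fd, ([] : List String))).1

theorem pv_A_outer (L : List String) (hL : L.Nodup) (E : PySem.Dict String Int)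
    (hEk : E.keys = L) (hEv : ∀ k, E.getD k 0 = 0) (l : List String)
    (hsub : ∀ w ∈ l, ∀ s ∈ pvStrs w, s ∈ L) :
    ∀ (fd : PySem.Dict String (PySem.Dict String Int)) (S : List String) (G : String → String → Int),
    fd.keys = L →
    (∀ c ∈ L, fd.getD c PySem.Dict.empty = PySem.Dict.empty ∨ (fd.getD c PySem.Dict.empty).keys = L) →
    (∀ c ∈ L, c ∈ S → (fd.getD c PySem.Dict.empty).keys = L) →
    (∀ c ∈ L, ∀ d, (fd.getD c PySem.Dict.empty).getD d 0 = G c d) →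
    ((l.foldl (pvAstep E) fd).keys = L ∧
     (∀ c ∈ L, (l.foldl (pvAstep E) fd).getD c PySem.Dict.empty = PySem.Dict.empty ∨
        ((l.foldl (pvAstep E) fd).getD c PySem.Dict.empty).keys = L) ∧
     (∀ c ∈ L, c ∈ S ++ l.flatMap pvStrs → ((l.foldl (pvAstep E) fd).getD c PySem.Dict.empty).keys = L) ∧
     ∀ c ∈ L, ∀ d, ((l.foldl (pvAstep E) fd).getD c PySem.Dict.empty).getD d 0 = G c d + pvG l c d) := by
  induction l with
  | nil =>
    intro fd S G hk hrows hfull hv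
    refine ⟨hk, hrows, fun c hc hm => hfull c hc (by simpa using hm), fun c hc d => by simp [pvG, hv c hc d]⟩
  | cons w rest ih =>
    intro fd S G hk hrows hfull hv
    rw [List.foldl_cons]
    obtain ⟨hTk, hTv⟩ := pv_tempdict L hL E hEk hEv w (hsub w (by simp))
    obtain ⟨h1, h2, h3, h5, h4⟩ := pv_A_word L hL (mergedict E (simple_histogram w)) hTk w.toList
      (fun c hc => hsub w (by simp) _ (List.mem_map.mpr ⟨c, hc, rfl⟩)) fd []
      hk hrows (by simp)
    obtain ⟨ihk, ihrows, ihfull, ihv⟩ := ih (fun w' hw' => hsub w' (by simp [hw']))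
      (pvAstep E fd w) (S ++ pvStrs w)
      (fun c d => G c d + (if c ∈ pvStrs w then pvCnt w d else 0))
      h1 h2
      (fun c hc hm => by
        rcases List.mem_append.mp hm with h | h
        · exact h5 c hc (hfull c hc h)
        · exact h3 c hc (by simpa [pvStrs, List.mem_map] using h))
      (fun c hc d => by
        rw [show pvAstep E fd w = (w.toList.foldl (pvAstepW (mergedict E (simple_histogram w))) (fd, ([] : List String))).1 from rfl]
        rw [h4 c hc d, hv c hc d]
        congr 1
        by_cases hcw : c ∈ pvStrs w
        · rw [if_pos ⟨hcw, by simp⟩, if_pos hcw, hTv d]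
        · rw [if_neg (by simpa [pvStrs] using hcw), if_neg hcw])
    refine ⟨ihk, ihrows, fun c hc hm => ihfull c hc ?_, fun c hc d => ?_⟩
    · simp only [List.mem_append, List.flatMap_cons] at hm ⊢
      tauto
    · rw [ihv c hc d, pvG_cons]
      ring

def pvLetters (ws : List String) : List String :=
  PySem.List.dedup (ws.flatMap (fun w => w.toList.map (fun c => String.ofList [c])))
def pvE (ws : List String) : PySem.Dict String Int :=
  (ws.flatMap String.toList).foldl (fun d c => d.insert (String.ofList [c]) 0) PySem.Dict.empty
def pvF0 (ws : List String) : PySem.Dict String (PySem.Dict String Int) :=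
  (ws.flatMap String.toList).foldl (fun d c => d.insert (String.ofList [c]) PySem.Dict.empty) PySem.Dict.empty

theorem pv_letters_eq (ws : List String) :
    pvLetters ws = PySem.Set.ofList (ws.flatMap pvStrs) := rfl

theorem pv_letters_nodup (ws : List String) : (pvLetters ws).Nodup :=
  PySem.Set.nodup_ofList _

theorem pv_mem_letters (ws : List String) (c : String) :
    c ∈ pvLetters ws ↔ c ∈ ws.flatMap pvStrs := PySem.Set.mem_ofList _ _

theorem pv_E_keys (ws : List String) : (pvE ws).keys = pvLetters ws := by
  unfold pvE
  rw [PySem.Dict.keys_foldl_insert_key (ws.flatMap String.toList) (fun c => String.ofList [c]) (fun _ _ => 0) PySem.Dict.empty]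
  rw [pv_letters_eq]
  show PySem.Set.update PySem.Dict.empty.keys _ = _
  rw [PySem.Dict.keys_empty]
  show PySem.Set.ofList _ = _
  congr 1
  rw [List.map_flatMap]
  rfl

theorem pv_E_val (ws : List String) (k : String) : (pvE ws).getD k 0 = 0 :=
  pv_foldl_insert_getD_const _ _ _ _ (fun _ => by simp) k

theorem pv_F0_keys (ws : List String) : (pvF0 ws).keys = pvLetters ws := by
  unfold pvF0
  rw [PySem.Dict.keys_foldl_insert_key (ws.flatMap String.toList) (fun c => String.ofList [c]) (fun _ _ => PySem.Dict.empty) PySem.Dict.empty]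
  rw [pv_letters_eq]
  show PySem.Set.update PySem.Dict.empty.keys _ = _
  rw [PySem.Dict.keys_empty]
  show PySem.Set.ofList _ = _
  congr 1
  rw [List.map_flatMap]
  rfl

theorem pv_F0_val (ws : List String) (k : String) :
    (pvF0 ws).getD k PySem.Dict.empty = PySem.Dict.empty :=
  pv_foldl_insert_getD_const _ _ _ _ (fun _ => by simp) k

theorem pv_pair_split (ws : List String) :
    ws.foldl
      (fun (p : PySem.Dict String Int × PySem.Dict String (PySem.Dict String Int)) word =>
        word.toList.foldl (fun p letter =>
          (p.1.insert (String.ofList [letter]) 0, p.2.insert (String.ofList [letter]) PySem.Dict.empty)) p)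
      (PySem.Dict.empty, PySem.Dict.empty) = (pvE ws, pvF0 ws) := by
  have hcongr := PySem.List.foldl_congr_mem
    (l := ws)
    (init := ((PySem.Dict.empty, PySem.Dict.empty) : PySem.Dict String Int × PySem.Dict String (PySem.Dict String Int)))
    (f := fun (p : PySem.Dict String Int × PySem.Dict String (PySem.Dict String Int)) word =>
      word.toList.foldl (fun p letter =>
        (p.1.insert (String.ofList [letter]) 0, p.2.insert (String.ofList [letter]) PySem.Dict.empty)) p)
    (g := fun (p : PySem.Dict String Int × PySem.Dict String (PySem.Dict String Int)) word =>
      (word.toList.foldl (fun d letter => d.insert (String.ofList [letter]) 0) p.1,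
       word.toList.foldl (fun d letter => d.insert (String.ofList [letter]) PySem.Dict.empty) p.2))
    (by
      intro acc x _
      obtain ⟨a, b⟩ := acc
      exact PySem.List.foldl_prod_mk
        (f := fun d letter => d.insert (String.ofList [letter]) 0)
        (g := fun d letter => d.insert (String.ofList [letter]) PySem.Dict.empty) x.toList a b)
  have hsplit := PySem.List.foldl_prod_mk
    (f := fun (d : PySem.Dict String Int) word => word.toList.foldl (fun d letter => d.insert (String.ofList [letter]) (0 : Int)) d)
    (g := fun (d : PySem.Dict String (PySem.Dict String Int)) word => word.toList.foldl (fun d letter => d.insert (String.ofList [letter]) (PySem.Dict.empty : PySem.Dict String Int)) d)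
    ws PySem.Dict.empty PySem.Dict.empty
  refine hcongr.trans (hsplit.trans ?_)
  rw [pv_foldl_foldl_flatMap, pv_foldl_foldl_flatMap]
  rfl

theorem pv_A_eq (s : String) :
    funny_histogram s =
      (((PySem.Str.split? s " ").getD []).foldl
        (pvAstep (pvE ((PySem.Str.split? s " ").getD [])))
        (pvF0 ((PySem.Str.split? s " ").getD []))).items.map (fun p => (p.1, p.2.items)) := by
  unfold funny_histogram
  simp only []
  rw [pv_pair_split]
  rfl

-- B-side: the closed-form cell equals the accumulated value pvG, for 1-char column/row keys.
theorem pv_isIn_single (cc : Char) (w : String) :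
    PySem.Str.isIn (String.ofList [cc]) w = true ↔ String.ofList [cc] ∈ pvStrs w := by
  rw [PySem.Str.isIn_iff_infix]
  constructor
  · intro h
    have hm : cc ∈ w.toList := by
      obtain ⟨s, t, hst⟩ := h
      have : cc ∈ s ++ (String.ofList [cc]).toList ++ t := by
        simp [String.toList_ofList]
      rw [hst] at this
      exact this
    exact List.mem_map.mpr ⟨cc, hm, rfl⟩
  · intro h
    obtain ⟨c', hc', he⟩ := List.mem_map.mp h
    have : c' = cc := by
      have := congrArg String.toList he
      simpa [String.toList_ofList] using this
    subst this
    obtain ⟨s, t, hst⟩ := List.append_of_mem hc'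
    exact ⟨s, t, by simp [String.toList_ofList, hst]⟩

theorem pv_cnt_eq (w d : String) :
    pvCnt w d = ((w.toList.filter (fun ch => PySem.Chars.islower ch && (String.ofList [ch] == d))).length : Int) := by
  unfold pvCnt pvLch
  congr 1
  generalize w.toList = l
  induction l with
  | nil => rfl
  | cons a t ih =>
    by_cases ha : PySem.Chars.islower a
    · by_cases hd : String.ofList [a] = d
      · simp [List.filter_cons, ha, hd, List.count_cons, ih]
      · simp [List.filter_cons, ha, hd, List.count_cons, ih]
    · simp [List.filter_cons, ha, ih]

theorem pv_cell_eq (ws : List String) (cc : Char) (d : String) :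
    fh_cell ws (String.ofList [cc]) d = pvG ws (String.ofList [cc]) d := by
  unfold fh_cell pvG
  induction ws with
  | nil => rfl
  | cons w rest ih =>
    rw [List.filter_cons, List.map_cons]
    by_cases h : String.ofList [cc] ∈ pvStrs w
    · rw [if_pos ((pv_isIn_single cc w).mpr h), List.map_cons, List.sum_cons, List.sum_cons, ih,
        if_pos h, pv_cnt_eq w d]
    · have : PySem.Str.isIn (String.ofList [cc]) w = false := by
        cases hx : PySem.Str.isIn (String.ofList [cc]) w
        · rfl
        · exact absurd ((pv_isIn_single cc w).mp hx) h
      have h2 : PySem.Chars.isIn [cc] w.toList = false := by simpa using this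
      rw [if_neg (by simp [h2]), List.sum_cons, ih, if_neg h]
      simp

theorem pv_final (ws : List String) :
    (ws.foldl (pvAstep (pvE ws)) (pvF0 ws)).items.map (fun p => (p.1, p.2.items)) =
      (pvLetters ws).map (fun c => (c, (pvLetters ws).map (fun d => (d, fh_cell ws c d)))) := by
  have hL := pv_letters_nodup ws
  have hsub : ∀ w ∈ ws, ∀ s ∈ pvStrs w, s ∈ pvLetters ws := by
    intro w hw s hs
    exact (pv_mem_letters ws s).mpr (List.mem_flatMap.mpr ⟨w, hw, hs⟩)
  obtain ⟨hak, harows, hafull, hav⟩ := pv_A_outer (pvLetters ws) hL (pvE ws)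
    (pv_E_keys ws) (pv_E_val ws) ws hsub (pvF0 ws) [] (fun _ _ => 0)
    (pv_F0_keys ws)
    (fun c _ => Or.inl (pv_F0_val ws c))
    (fun c _ hm => absurd hm (List.not_mem_nil))
    (fun c _ d => by rw [pv_F0_val ws c]; simp)
  set F := ws.foldl (pvAstep (pvE ws)) (pvF0 ws) with hF
  rw [PySem.Dict.items_eq_map_keys F (hak ▸ hL) PySem.Dict.empty, hak, List.map_map]
  apply List.map_congr_left
  intro c hc
  simp only [Function.comp]
  congr 1
  have hrowk : (F.getD c PySem.Dict.empty).keys = pvLetters ws :=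
    hafull c hc (by simpa using (pv_mem_letters ws c).mp hc)
  rw [PySem.Dict.items_eq_map_keys (F.getD c PySem.Dict.empty) (hrowk ▸ hL) 0, hrowk]
  apply List.map_congr_left
  intro d hd
  have hcform : ∃ cc, c = String.ofList [cc] := by
    have : c ∈ ws.flatMap pvStrs := (pv_mem_letters ws c).mp hc
    obtain ⟨w, _, hcw⟩ := List.mem_flatMap.mp this
    obtain ⟨cc, _, he⟩ := List.mem_map.mp hcw
    exact ⟨cc, he.symm⟩
  obtain ⟨cc, rfl⟩ := hcform
  rw [hav _ hc d, pv_cell_eq ws cc d]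
  simp

theorem pv_B_eq (s : String) :
    funny_histogram_alt s =
      (pvLetters ((PySem.Str.split? s " ").getD [])).map
        (fun c => (c, (pvLetters ((PySem.Str.split? s " ").getD [])).map
          (fun d => (d, fh_cell ((PySem.Str.split? s " ").getD []) c d)))) := rfl

-- ===== VERDICT (by name: the statement is the Claim_ definition above) =====
theorem funny_histogram_spec : Claim_equal_funny_histogram := by
  intro sentence _
  show funny_histogram sentence = funny_histogram_alt sentence
  rw [pv_A_eq, pv_B_eq, pv_final]
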